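-- pv_equiv track=rewrite | github.com/reyemDarnok/active-learning | focusStepsPelmo/pelmo/runner.py | find_duration
-- ===== SOURCE A (Python) =====
-- def find_duration(psm_file_string) -> int:
--     """Given a psm file, find out how long it runs"""
--     in_application = False
--     max_year = 0
--     for line in psm_file_string.splitlines():
--         if not in_application:
--             if line.startswith("<APPLICATION>"):
--                 in_application = True
--             continue
--         if in_application:
--             if line.startswith("<END APPLICATION>"):
--                 break
--             try:
--                 current = int(line.split()[2])
--                 max_year = max(max_year, current)
--             except ValueError:
--                 pass
--             except IndexError:
--                 pass
--     if max_year <= 26: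
--         return 26
--     elif max_year <= 46:
--         return 46
--     else:
--         return max_year
-- ===== SOURCE B (Python) =====
-- def find_duration(psm_file_string) -> int:
--     """Given a psm file, find out how long it runs"""
--     lines = psm_file_string.splitlines()
--     block = []
--     for i, line in enumerate(lines):
--         if line.startswith("<APPLICATION>"):
--             rest = lines[i + 1:]
--             end = len(rest)
--             for j, l in enumerate(rest):
--                 if l.startswith("<END APPLICATION>"):
--                     end = j
--                     break
--             block = rest[:end]
--             break
--     years = []
--     for line in block:
--         parts = line.split()
--         if len(parts) > 2:
--             try:
--                 years.append(int(parts[2]))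
--             except ValueError:
--                 pass
--     max_year = max([0] + years)
--     if max_year <= 26:
--         return 26
--     elif max_year <= 46:
--         return 46
--     else:
--         return max_year
-- ===== Notes on version B (the rewrite author's own statement) =====
-- stated objective: simpler
-- what changed: B replaces A's single stateful flag/break loop by a pipeline: locate the <APPLICATION> marker, slice the block up to <END APPLICATION>, collect the parsed third fields, and take max with default 0, then bucket.
import Mathlib
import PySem

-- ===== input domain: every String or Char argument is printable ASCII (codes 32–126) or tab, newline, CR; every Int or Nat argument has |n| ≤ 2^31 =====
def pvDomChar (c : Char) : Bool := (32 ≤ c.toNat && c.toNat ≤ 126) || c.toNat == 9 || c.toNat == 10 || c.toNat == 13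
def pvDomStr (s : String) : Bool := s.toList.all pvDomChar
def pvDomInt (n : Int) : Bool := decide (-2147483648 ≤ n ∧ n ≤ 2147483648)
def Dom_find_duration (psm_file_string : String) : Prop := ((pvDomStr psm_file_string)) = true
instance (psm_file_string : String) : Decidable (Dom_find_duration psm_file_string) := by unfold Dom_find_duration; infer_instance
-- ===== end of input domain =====

-- B replaces A's stateful flag/break loop by a locate-slice-parse-max pipeline (simpler decomposition, same cost).

-- ===== PORT A =====
-- the for-loop of A: state = (in_application, max_year); 'break' returns max_year
def findDurLoopA : List String → Bool → Int → Int
  | [], _, max_year => max_year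
  | line :: rest, false, max_year =>
    if PySem.Str.startswith line "<APPLICATION>" then
      findDurLoopA rest true max_year
    else
      findDurLoopA rest false max_year
  | line :: rest, true, max_year =>
    if PySem.Str.startswith line "<END APPLICATION>" then max_year
    else
      match PySem.List.pyGet? (PySem.Str.split₀ line) 2 with
      | none => findDurLoopA rest true max_year        -- IndexError: pass
      | some w =>
        match PySem.Int.ofStr? w with
        | none => findDurLoopA rest true max_year      -- ValueError: pass
        | some current => findDurLoopA rest true (max max_year current)

def find_duration (psm_file_string : String) : Int :=
  let max_year := findDurLoopA (PySem.Str.splitlines psm_file_string) false 0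
  if max_year ≤ 26 then 26
  else if max_year ≤ 46 then 46
  else max_year

-- ===== PORT B =====
-- parse of one block line: int(line.split()[2]) if it exists and parses
def parseYearB (line : String) : Option Int :=
  (PySem.List.pyGet? (PySem.Str.split₀ line) 2).bind PySem.Int.ofStr?

def find_duration_alt (psm_file_string : String) : Int :=
  let lines := PySem.Str.splitlines psm_file_string
  let block :=
    match lines.findIdx? (fun l => PySem.Str.startswith l "<APPLICATION>") with
    | none => []
    | some i =>
      let rest := lines.drop (i + 1)
      rest.takeWhile (fun l => !PySem.Str.startswith l "<END APPLICATION>")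
  let years := block.filterMap parseYearB
  let max_year := years.foldl max (0 : Int)   -- max([0] + years)
  if max_year ≤ 26 then 26
  else if max_year ≤ 46 then 46
  else max_year

-- ===== PRECONDITION & SPEC =====
def Spec_find_duration (psm_file_string : String) (out : Int) : Prop := out = find_duration_alt psm_file_string
instance (psm_file_string : String) (out : Int) : Decidable (Spec_find_duration psm_file_string out) := by unfold Spec_find_duration; infer_instance

-- ===== CLAIM (what is proved, stated in full; the proofs are below) =====
def Claim_equal_find_duration : Prop := ∀ (psm_file_string : String), Dom_find_duration psm_file_string → Spec_find_duration psm_file_string (find_duration psm_file_string)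

-- ===== LEMMAS AND PROOFS =====

-- phase 2 of A's loop equals a fold of the parsed years over the block
theorem loopA_true_eq (lines : List String) : ∀ (m : Int),
    findDurLoopA lines true m
      = ((lines.takeWhile (fun l => !PySem.Str.startswith l "<END APPLICATION>")).filterMap parseYearB).foldl max m := by
  induction lines with
  | nil => intro m; simp [findDurLoopA]
  | cons l rest ih =>
    intro m
    simp only [findDurLoopA, List.takeWhile_cons]
    cases hE : PySem.Str.startswith l "<END APPLICATION>" with
    | true => simp
    | false =>
      simp only [Bool.false_eq_true, if_false, Bool.not_false, if_true, List.filterMap_cons]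
      cases hg : PySem.List.pyGet? (PySem.Str.split₀ l) 2 with
      | none =>
        have hp : parseYearB l = none := by simp [parseYearB, hg]
        simp [hp, ih]
      | some w =>
        cases hv : PySem.Int.ofStr? w with
        | none =>
          have hp : parseYearB l = none := by simp [parseYearB, hg, hv]
          simp [hv, hp, ih]
        | some c =>
          have hp : parseYearB l = some c := by simp [parseYearB, hg, hv]
          simp [hv, hp, ih]

-- phase 1: scanning for the marker equals findIdx? + drop
theorem loopA_false_eq (lines : List String) : ∀ (m : Int),
    findDurLoopA lines false m
      = match lines.findIdx? (fun l => PySem.Str.startswith l "<APPLICATION>") with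
        | none => m
        | some i => findDurLoopA (lines.drop (i + 1)) true m := by
  induction lines with
  | nil => intro m; simp [findDurLoopA]
  | cons l rest ih =>
    intro m
    simp only [findDurLoopA, List.findIdx?_cons]
    cases hA : PySem.Str.startswith l "<APPLICATION>" with
    | true => simp
    | false =>
      simp only [Bool.false_eq_true, if_false, ih]
      cases hf : rest.findIdx? (fun l => PySem.Str.startswith l "<APPLICATION>") with
      | none => simp
      | some i => simp [List.drop_succ_cons]

-- ===== VERDICT (by name: the statement is the Claim_ definition above) =====
theorem find_duration_spec : Claim_equal_find_duration := by
  intro s _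
  unfold Spec_find_duration find_duration find_duration_alt
  rw [loopA_false_eq]
  cases hf : (PySem.Str.splitlines s).findIdx? (fun l => PySem.Str.startswith l "<APPLICATION>") with
  | none => simp only [hf]; norm_num
  | some i => simp only [hf]; rw [loopA_true_eq]
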